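-- pv_equiv track=rewrite | github.com/ahui2016/py-scripts | src/scripts/cf_r2.py | minus_summary
-- ===== SOURCE A (Python) =====
-- def minus_summary(deleted, summary):
--     """删除文件时, 根据删除结果更新统计数字."""
--     for obj in deleted:
--         month = obj['Key'][:6]
--         n = summary.get(month, 0)
--         summary[month] = n - 1
--
--         if summary[month] <= 0:
--             del summary[month]
--
--     return summary
-- ===== SOURCE B (Python) =====
-- def minus_summary(deleted, summary):
--     """Aggregate deletions per month first, then apply each net decrement once."""
--     tally = {}
--     for obj in deleted:
--         m = obj['Key'][:6]
--         tally[m] = tally.get(m, 0) + 1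
--     for month, count in tally.items():
--         n = summary.get(month, 0) - count
--         if n <= 0:
--             summary.pop(month, None)
--         else:
--             summary[month] = n
--     return summary
-- ===== Notes on version B (the rewrite author's own statement) =====
-- stated objective: alternative
-- what changed: B replaces A's per-deleted-item decrement-and-maybe-delete loop over the summary dict with a two-phase shape: one pass builds a per-month tally of deletions, then each month's net decrement is applied to summary exactly once (deleting the key when the result is <= 0).
-- outside the precondition, e.g. on minus_summary([{}], {'202401': 2}): A raises KeyError, B raises KeyError
import Mathlib
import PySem

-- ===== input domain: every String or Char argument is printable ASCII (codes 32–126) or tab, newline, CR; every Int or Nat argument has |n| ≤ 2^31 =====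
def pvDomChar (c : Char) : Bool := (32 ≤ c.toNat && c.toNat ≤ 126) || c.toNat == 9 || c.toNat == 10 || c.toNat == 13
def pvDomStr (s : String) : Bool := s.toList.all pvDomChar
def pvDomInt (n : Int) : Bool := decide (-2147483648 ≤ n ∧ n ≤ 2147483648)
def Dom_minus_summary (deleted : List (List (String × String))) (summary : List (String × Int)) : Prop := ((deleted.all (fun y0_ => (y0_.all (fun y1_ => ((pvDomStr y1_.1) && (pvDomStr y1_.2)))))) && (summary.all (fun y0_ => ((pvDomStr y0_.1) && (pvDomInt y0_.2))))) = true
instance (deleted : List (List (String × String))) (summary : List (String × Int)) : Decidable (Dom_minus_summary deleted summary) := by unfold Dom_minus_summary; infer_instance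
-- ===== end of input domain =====

-- B aggregates the per-month deletion counts in one pass and then applies each
-- month's net decrement once, instead of A's per-item decrement-and-maybe-delete
-- loop (objective: alternative decomposition; both mutate `summary` in place in
-- Python — the equivalence proved here is about the returned value).

-- ===== PORT A =====
-- obj['Key'][:6] (used by both ports; obj['Key'] raises KeyError when absent — excluded by Pre_)
def pvMonth (obj : List (String × String)) : String :=
  PySem.Str.slice ((PySem.Dict.ofList obj).getD "Key" "") none (some 6)

def minus_summary (deleted : List (List (String × String))) (summary : List (String × Int)) : List (String × Int) :=
  (deleted.foldl (fun d obj =>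
      let month := pvMonth obj
      let n := d.getD month 0
      let d1 := d.insert month (n - 1)
      if d1.getD month 0 ≤ 0 then d1.erase month else d1)
    (PySem.Dict.ofList summary)).items

-- ===== PORT B =====
def minus_summary_alt (deleted : List (List (String × String))) (summary : List (String × Int)) : List (String × Int) :=
  let tally := deleted.foldl (fun t obj =>
      let m := pvMonth obj
      t.insert m (t.getD m 0 + 1)) PySem.Dict.empty
  (tally.items.foldl (fun d p =>
      let n := d.getD p.1 0 - p.2
      if n ≤ 0 then d.erase p.1 else d.insert p.1 n)
    (PySem.Dict.ofList summary)).items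

-- ===== PRECONDITION & SPEC =====
-- Pre_ excludes only inputs where some obj in deleted lacks the 'Key' key: there Python A (and B) raises KeyError.
def Pre_minus_summary (deleted : List (List (String × String))) (_summary : List (String × Int)) : Prop :=
  ∀ obj ∈ deleted, "Key" ∈ obj.map Prod.fst
instance (deleted : List (List (String × String))) (summary : List (String × Int)) : Decidable (Pre_minus_summary deleted summary) := by unfold Pre_minus_summary; infer_instance
def pvWitness_minus_summary : (List (List (String × String))) × (List (String × Int)) :=
  ([[("Key", "202401-a.txt")], [("Key", "202402-b.txt")]], [("202401", 3), ("202402", 1)])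

def Spec_minus_summary (deleted : List (List (String × String))) (summary : List (String × Int)) (out : List (String × Int)) : Prop := out = minus_summary_alt deleted summary
instance (deleted : List (List (String × String))) (summary : List (String × Int)) (out : List (String × Int)) : Decidable (Spec_minus_summary deleted summary out) := by unfold Spec_minus_summary; infer_instance

-- ===== CLAIM (what is proved, stated in full; the proofs are below) =====
def Claim_equal_minus_summary : Prop := ∀ (deleted : List (List (String × String))) (summary : List (String × Int)), Dom_minus_summary deleted summary → Pre_minus_summary deleted summary → Spec_minus_summary deleted summary (minus_summary deleted summary)

-- ===== LEMMAS AND PROOFS =====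

-- A's loop body, on the month string
def pvStepA (d : PySem.Dict String Int) (m : String) : PySem.Dict String Int :=
  if (d.insert m (d.getD m 0 - 1)).getD m 0 ≤ 0 then (d.insert m (d.getD m 0 - 1)).erase m
  else d.insert m (d.getD m 0 - 1)

-- B's second-loop body, on a (month, count) pair
def pvStepB (d : PySem.Dict String Int) (p : String × Int) : PySem.Dict String Int :=
  if d.getD p.1 0 - p.2 ≤ 0 then d.erase p.1 else d.insert p.1 (d.getD p.1 0 - p.2)

-- canonical effect of A's whole loop on one summary entry, given the month multiset ms
def pvKeepA (ms : List String) (p : String × Int) : Option (String × Int) :=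
  if ms.count p.1 = 0 then some p
  else if (ms.count p.1 : Int) < p.2 then some (p.1, p.2 - ms.count p.1) else none

-- canonical effect of B's second loop on one summary entry, given the tally items L
def pvKeepB (L : List (String × Int)) (p : String × Int) : Option (String × Int) :=
  match (L.find? (fun q => q.1 == p.1)).map (·.2) with
  | none => some p
  | some cnt => if cnt < p.2 then some (p.1, p.2 - cnt) else none

theorem pvErase_keys_sublist (d : PySem.Dict String Int) (m : String) :
    ((d.erase m).keys).Sublist d.keys := by
  simpa [PySem.Dict.erase, PySem.Dict.keys, List.map_filter] using
    (List.filter_sublist (l := d.items)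
      (p := fun p => !(p.1 == m))).map Prod.fst

theorem pvStepA_nodup (d : PySem.Dict String Int) (m : String) (h : d.keys.Nodup) :
    (pvStepA d m).keys.Nodup := by
  unfold pvStepA
  have h1 : (d.insert m (d.getD m 0 - 1)).keys.Nodup := PySem.Dict.nodup_keys_insert _ _ _ h
  split
  · exact (pvErase_keys_sublist _ _).nodup h1
  · exact h1

theorem pvCount_cons_self (m : String) (ms : List String) :
    (m :: ms).count m = ms.count m + 1 := by simp

theorem pvCount_cons_ne (m k : String) (ms : List String) (h : k ≠ m) :
    (m :: ms).count k = ms.count k := by simp [h.symm]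

-- the unique entry at a present key carries the getD value
theorem pvEntry_val (d : PySem.Dict String Int) (q : String × Int) (hq : q ∈ d.items)
    (h : d.keys.Nodup) : d.getD q.1 0 = q.2 :=
  PySem.Dict.getD_of_mem_items d (by simpa using hq) h 0

theorem pvNotMem_of_not_contains (d : PySem.Dict String Int) (m : String)
    (hc : ¬ d.contains m = true) (q : String × Int) (hq : q ∈ d.items) : q.1 ≠ m := by
  intro hqm
  exact hc ((PySem.Dict.contains_iff_mem_keys d m).2
    (by simpa [PySem.Dict.keys, hqm] using List.mem_map_of_mem (f := Prod.fst) hq))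

theorem pvStepA_items (d : PySem.Dict String Int) (m : String) (ms : List String)
    (h : d.keys.Nodup) :
    (pvStepA d m).items.filterMap (pvKeepA ms) = d.items.filterMap (pvKeepA (m :: ms)) := by
  have hself : (d.insert m (d.getD m 0 - 1)).getD m 0 = d.getD m 0 - 1 :=
    PySem.Dict.getD_insert_self d m _ 0
  unfold pvStepA
  rw [hself]
  by_cases hc : d.contains m = true
  · have hitems := PySem.Dict.items_insert_of_contains d (d.getD m 0 - 1) hc
    by_cases hle : d.getD m 0 - 1 ≤ 0
    · rw [if_pos hle]
      have herase : ((d.insert m (d.getD m 0 - 1)).erase m).items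
          = (d.insert m (d.getD m 0 - 1)).items.filter (fun p => !(p.1 == m)) := rfl
      rw [herase, hitems, List.filter_map, List.filterMap_map, List.filterMap_filter]
      refine List.filterMap_congr (fun q hq => ?_)
      by_cases hqm : q.1 = m
      · have hv : d.getD m 0 = q.2 := hqm ▸ pvEntry_val d q hq h
        simp only [Function.comp, hqm, beq_self_eq_true, if_true, Bool.not_true,
          Bool.false_eq_true, if_false, pvKeepA, pvCount_cons_self]
        rw [if_neg (by omega), if_neg (by push_cast; omega)]
      · have hbeq : (q.1 == m) = false := beq_eq_false_iff_ne.2 hqm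
        simp only [Function.comp, hbeq, Bool.false_eq_true, Bool.not_false, if_false, if_true,
          pvKeepA, pvCount_cons_ne m q.1 ms hqm]
    · rw [if_neg hle, hitems, List.filterMap_map]
      refine List.filterMap_congr (fun q hq => ?_)
      by_cases hqm : q.1 = m
      · have hv : d.getD m 0 = q.2 := hqm ▸ pvEntry_val d q hq h
        simp only [Function.comp, hqm, beq_self_eq_true, if_true, pvKeepA,
          pvCount_cons_self]
        rcases Nat.eq_zero_or_pos (ms.count m) with h0 | hpos
        · rw [h0]
          rw [if_pos rfl, if_neg (by omega), if_pos (by push_cast; omega)]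
          simp [hv]
        · have hL0 : ¬ (ms.count m = 0) := by omega
          have hR0 : ¬ (ms.count m + 1 = 0) := by omega
          rw [if_neg hL0, if_neg hR0]
          by_cases hlt : (ms.count m : Int) < d.getD m 0 - 1
          · rw [if_pos hlt, if_pos (by push_cast at hlt ⊢; omega)]
            simp only [Option.some.injEq, Prod.mk.injEq]
            exact ⟨by simp, by push_cast; omega⟩
          · rw [if_neg hlt, if_neg (by push_cast at hlt ⊢; omega)]
      · have hbeq : (q.1 == m) = false := beq_eq_false_iff_ne.2 hqm
        simp only [Function.comp, hbeq, Bool.false_eq_true, if_false, pvKeepA,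
          pvCount_cons_ne m q.1 ms hqm]
  · have h0 : d.getD m 0 = 0 := PySem.Dict.getD_of_not_contains d 0 (by simpa using hc)
    have hitems := PySem.Dict.items_insert_of_not_contains d (d.getD m 0 - 1) (by simpa using hc)
    rw [if_pos (by omega)]
    have herase : ((d.insert m (d.getD m 0 - 1)).erase m).items
        = (d.insert m (d.getD m 0 - 1)).items.filter (fun p => !(p.1 == m)) := rfl
    have hid : (d.insert m (d.getD m 0 - 1)).items.filter (fun p => !(p.1 == m)) = d.items := by
      rw [hitems, List.filter_append]
      simp only [List.filter_cons, beq_self_eq_true, Bool.not_true, Bool.false_eq_true,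
        if_false, List.filter_nil, List.append_nil]
      exact List.filter_eq_self.2 (fun q hq => by
        simp [beq_eq_false_iff_ne.2 (pvNotMem_of_not_contains d m hc q hq)])
    rw [herase, hid]
    refine List.filterMap_congr (fun q hq => ?_)
    have hqm : q.1 ≠ m := pvNotMem_of_not_contains d m hc q hq
    simp only [pvKeepA, pvCount_cons_ne m q.1 ms hqm]

theorem pvFoldA_items (ms : List String) (d : PySem.Dict String Int) (h : d.keys.Nodup) :
    (ms.foldl pvStepA d).items = d.items.filterMap (pvKeepA ms) := by
  induction ms generalizing d with
  | nil => simp [pvKeepA]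
  | cons m ms ih =>
    rw [List.foldl_cons, ih _ (pvStepA_nodup d m h), pvStepA_items d m ms h]

theorem pvStepB_nodup (d : PySem.Dict String Int) (p : String × Int) (h : d.keys.Nodup) :
    (pvStepB d p).keys.Nodup := by
  unfold pvStepB
  split
  · exact (pvErase_keys_sublist _ _).nodup h
  · exact PySem.Dict.nodup_keys_insert _ _ _ h

theorem pvKeepB_cons_ne (k : String) (c : Int) (rest : List (String × Int)) (q : String × Int)
    (h : q.1 ≠ k) : pvKeepB ((k, c) :: rest) q = pvKeepB rest q := by
  simp [pvKeepB, beq_eq_false_iff_ne.2 (Ne.symm h)]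

theorem pvKeepB_cons_self (k : String) (c : Int) (rest : List (String × Int)) (q : String × Int)
    (h : q.1 = k) : pvKeepB ((k, c) :: rest) q = if c < q.2 then some (q.1, q.2 - c) else none := by
  simp [pvKeepB, h]

theorem pvKeepB_of_find?_none (rest : List (String × Int)) (q : String × Int)
    (h : rest.find? (fun r => r.1 == q.1) = none) : pvKeepB rest q = some q := by
  simp [pvKeepB, h]

theorem pvStepB_items (d : PySem.Dict String Int) (p0 : String × Int)
    (rest : List (String × Int)) (hfresh : p0.1 ∉ rest.map Prod.fst) (hpos : 1 ≤ p0.2)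
    (h : d.keys.Nodup) :
    (pvStepB d p0).items.filterMap (pvKeepB rest) = d.items.filterMap (pvKeepB (p0 :: rest)) := by
  unfold pvStepB
  by_cases hc : d.contains p0.1 = true
  · by_cases hle : d.getD p0.1 0 - p0.2 ≤ 0
    · rw [if_pos hle]
      have herase : (d.erase p0.1).items = d.items.filter (fun q => !(q.1 == p0.1)) := rfl
      rw [herase, List.filterMap_filter]
      refine List.filterMap_congr (fun q hq => ?_)
      by_cases hqm : q.1 = p0.1
      · have hv : d.getD p0.1 0 = q.2 := hqm ▸ pvEntry_val d q hq h
        simp only [hqm, beq_self_eq_true, Bool.not_true, Bool.false_eq_true, if_false]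
        rw [show p0 = (p0.1, p0.2) from rfl, pvKeepB_cons_self p0.1 p0.2 rest q hqm,
          if_neg (by omega)]
      · simp only [beq_eq_false_iff_ne.2 hqm, Bool.not_false, if_true]
        rw [show p0 = (p0.1, p0.2) from rfl, pvKeepB_cons_ne p0.1 p0.2 rest q hqm]
    · rw [if_neg hle, PySem.Dict.items_insert_of_contains d _ hc, List.filterMap_map]
      refine List.filterMap_congr (fun q hq => ?_)
      by_cases hqm : q.1 = p0.1
      · have hv : d.getD p0.1 0 = q.2 := hqm ▸ pvEntry_val d q hq h
        simp only [Function.comp, hqm, beq_self_eq_true, if_true]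
        have hnone : rest.find? (fun r => r.1 == p0.1) = none :=
          List.find?_eq_none.2 (fun r hr hbeq =>
            hfresh (eq_of_beq hbeq ▸ List.mem_map_of_mem (f := Prod.fst) hr))
        rw [pvKeepB_of_find?_none rest (p0.1, d.getD p0.1 0 - p0.2) hnone,
          show p0 = (p0.1, p0.2) from rfl, pvKeepB_cons_self p0.1 p0.2 rest q hqm,
          if_pos (by omega)]
        simp only [Option.some.injEq, Prod.mk.injEq]
        exact ⟨hqm.symm, by omega⟩
      · simp only [Function.comp, beq_eq_false_iff_ne.2 hqm, Bool.false_eq_true, if_false]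
        rw [show p0 = (p0.1, p0.2) from rfl, pvKeepB_cons_ne p0.1 p0.2 rest q hqm]
  · have h0 : d.getD p0.1 0 = 0 := PySem.Dict.getD_of_not_contains d 0 (by simpa using hc)
    rw [if_pos (by omega)]
    have herase : (d.erase p0.1).items = d.items.filter (fun q => !(q.1 == p0.1)) := rfl
    have hid : d.items.filter (fun q => !(q.1 == p0.1)) = d.items :=
      List.filter_eq_self.2 (fun q hq => by
        simp [beq_eq_false_iff_ne.2 (pvNotMem_of_not_contains d p0.1 hc q hq)])
    rw [herase, hid]
    refine List.filterMap_congr (fun q hq => ?_)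
    rw [show p0 = (p0.1, p0.2) from rfl,
      pvKeepB_cons_ne p0.1 p0.2 rest q (pvNotMem_of_not_contains d p0.1 hc q hq)]

theorem pvFoldB_items (L : List (String × Int)) (d : PySem.Dict String Int)
    (hL : (L.map Prod.fst).Nodup) (hpos : ∀ p ∈ L, 1 ≤ p.2) (h : d.keys.Nodup) :
    (L.foldl pvStepB d).items = d.items.filterMap (pvKeepB L) := by
  induction L generalizing d with
  | nil => simp [pvKeepB]
  | cons p0 rest ih =>
    have hL' : (p0.1 :: rest.map Prod.fst).Nodup := by rw [List.map_cons] at hL; exact hL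
    rw [List.foldl_cons,
      ih (pvStepB d p0) (List.nodup_cons.1 hL').2 (fun p hp => hpos p (List.mem_cons_of_mem _ hp))
        (pvStepB_nodup d p0 h),
      pvStepB_items d p0 rest (List.nodup_cons.1 hL').1 (hpos p0 List.mem_cons_self) h]

theorem pvFind_self (l : List String) (a : String) (h : a ∈ l) :
    l.find? (fun k => k == a) = some a := by
  induction l with
  | nil => simp at h
  | cons x xs ih =>
    rw [List.find?_cons]
    by_cases hx : x = a
    · simp [hx]
    · have hb : (x == a) = false := beq_eq_false_iff_ne.2 hx
      have h1 : a ∈ xs := by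
        rcases List.mem_cons.1 h with h1 | h1
        exacts [absurd h1.symm hx, h1]
      simp [hb, ih h1]

theorem pvKeep_eq (ms : List String) (p : String × Int) :
    pvKeepB ((PySem.Set.ofList ms).map (fun k => (k, (ms.count k : Int)))) p = pvKeepA ms p := by
  have hfind : ((PySem.Set.ofList ms).map (fun k => (k, (ms.count k : Int)))).find?
      (fun q => q.1 == p.1)
      = ((PySem.Set.ofList ms).find? (fun k => k == p.1)).map
          (fun k => (k, (ms.count k : Int))) := by
    rw [List.find?_map]; rfl
  by_cases hm : p.1 ∈ ms
  · have hsome : (PySem.Set.ofList ms).find? (fun k => k == p.1) = some p.1 :=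
      pvFind_self _ _ ((PySem.Set.mem_ofList ms p.1).2 hm)
    have hcpos : 0 < ms.count p.1 := List.count_pos_iff.2 hm
    simp only [pvKeepB, hfind, hsome, Option.map_some, pvKeepA, if_neg (by omega : ¬ ms.count p.1 = 0)]
  · have hnone : (PySem.Set.ofList ms).find? (fun k => k == p.1) = none :=
      List.find?_eq_none.2 (fun x hx hbeq =>
        hm (eq_of_beq hbeq ▸ (PySem.Set.mem_ofList ms x).1 hx))
    have hc0 : ms.count p.1 = 0 := by
      rw [List.count_eq_zero]; exact hm
    simp [pvKeepB, hfind, hnone, pvKeepA, hc0]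

-- ===== VERDICT (by name: the statement is the Claim_ definition above) =====
theorem minus_summary_spec : Claim_equal_minus_summary := by
  intro deleted summary _ _
  unfold Spec_minus_summary minus_summary minus_summary_alt
  show (deleted.foldl (fun d obj => pvStepA d (pvMonth obj)) (PySem.Dict.ofList summary)).items
      = (((deleted.foldl (fun t obj => t.insert (pvMonth obj) (t.getD (pvMonth obj) 0 + 1))
            PySem.Dict.empty).items).foldl pvStepB (PySem.Dict.ofList summary)).items
  rw [show deleted.foldl (fun d obj => pvStepA d (pvMonth obj)) (PySem.Dict.ofList summary)
      = (deleted.map pvMonth).foldl pvStepA (PySem.Dict.ofList summary) from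
        (List.foldl_map (f := pvMonth) (g := pvStepA) (l := deleted)
          (init := PySem.Dict.ofList summary)).symm,
    show deleted.foldl (fun t obj => t.insert (pvMonth obj) (t.getD (pvMonth obj) 0 + 1))
        PySem.Dict.empty
      = (deleted.map pvMonth).foldl
          (fun (t : PySem.Dict String Int) m => t.insert m (t.getD m 0 + 1)) PySem.Dict.empty from
        (List.foldl_map (f := pvMonth)
          (g := fun (t : PySem.Dict String Int) m => t.insert m (t.getD m 0 + 1))
          (l := deleted) (init := PySem.Dict.empty)).symm,
    PySem.Dict.foldl_insert_getD_add_one_eq_counter (deleted.map pvMonth)]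
  have hnd : (PySem.Dict.ofList summary).keys.Nodup := PySem.Dict.nodup_keys_ofList summary
  have hkeys : (PySem.Dict.counter (deleted.map pvMonth)).items.map Prod.fst
      = PySem.Set.ofList (deleted.map pvMonth) := by
    rw [PySem.Dict.items_counter, List.map_map]
    exact List.map_congr_left (fun k _ => rfl) |>.trans (List.map_id _)
  have hL : ((PySem.Dict.counter (deleted.map pvMonth)).items.map Prod.fst).Nodup := by
    rw [hkeys]; exact PySem.Set.nodup_ofList _
  have hpos : ∀ p ∈ (PySem.Dict.counter (deleted.map pvMonth)).items, 1 ≤ p.2 := by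
    intro p hp
    rw [PySem.Dict.items_counter] at hp
    rcases List.mem_map.1 hp with ⟨k, hk, rfl⟩
    have : 0 < (deleted.map pvMonth).count k :=
      List.count_pos_iff.2 ((PySem.Set.mem_ofList _ k).1 hk)
    simpa using this
  rw [pvFoldA_items (deleted.map pvMonth) _ hnd, pvFoldB_items _ _ hL hpos hnd,
    PySem.Dict.items_counter]
  exact (List.filterMap_congr (fun q _ => pvKeep_eq (deleted.map pvMonth) q)).symm
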